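-- pv_equiv track=rewrite | github.com/keith-decker/StarCitizenUtilities | sc_missions.py | _shorten_labels
-- ===== SOURCE A (Python) =====
-- def _longest_common_prefix(strings: list[str]) -> str:
--     if not strings:
--         return ""
--     prefix = strings[0]
--     for s in strings[1:]:
--         while not s.startswith(prefix):
--             prefix = prefix[:-1]
--             if not prefix:
--                 return ""
--     return prefix
--
-- def _longest_common_suffix(strings: list[str]) -> str:
--     if not strings:
--         return ""
--     suffix = strings[0]
--     for s in strings[1:]:
--         while not s.endswith(suffix):
--             suffix = suffix[1:]
--             if not suffix:
--                 return ""
--     return suffix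
--
-- def _shorten_labels(all_missions: list[str], pool_missions: list[str]) -> list[str]:
--     """
--     Strip the longest common prefix and suffix shared by ALL missions for a desc
--     key, then return the shortened labels for the given pool_missions subset.
--     Falls back to the full name if stripping produces an empty string.
--     """
--     prefix = _longest_common_prefix(all_missions)
--     suffix = _longest_common_suffix(all_missions)
--     labels = []
--     for m in pool_missions:
--         s = m
--         if prefix:
--             s = s[len(prefix) :]
--         if suffix and s.endswith(suffix):
--             s = s[: -len(suffix)]
--         labels.append(s or m)
--     return labels
-- ===== SOURCE B (Python) =====
-- def _common_prefix(strings: list[str]) -> str: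
--     out = []
--     for chars in zip(*strings):
--         if all(c == chars[0] for c in chars):
--             out.append(chars[0])
--         else:
--             break
--     return "".join(out)
--
--
-- def _common_suffix(strings: list[str]) -> str:
--     return _common_prefix([s[::-1] for s in strings])[::-1]
--
--
-- def _shorten_labels(all_missions: list[str], pool_missions: list[str]) -> list[str]:
--     prefix = _common_prefix(all_missions)
--     suffix = _common_suffix(all_missions)
--     labels = []
--     for m in pool_missions:
--         s = m
--         if prefix:
--             s = s[len(prefix):]
--         if suffix and s.endswith(suffix):
--             s = s[: -len(suffix)]
--         labels.append(s or m)
--     return labels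
-- ===== Notes on version B (the rewrite author's own statement) =====
-- stated objective: idiomatic
-- what changed: The common prefix/suffix helpers compute the answer by a single column scan over zip(*strings) (suffix = prefix of the reversed strings, reversed) instead of A's candidate-shrinking while-loops with early returns; the final stripping loop is kept as-is.
import Mathlib
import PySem

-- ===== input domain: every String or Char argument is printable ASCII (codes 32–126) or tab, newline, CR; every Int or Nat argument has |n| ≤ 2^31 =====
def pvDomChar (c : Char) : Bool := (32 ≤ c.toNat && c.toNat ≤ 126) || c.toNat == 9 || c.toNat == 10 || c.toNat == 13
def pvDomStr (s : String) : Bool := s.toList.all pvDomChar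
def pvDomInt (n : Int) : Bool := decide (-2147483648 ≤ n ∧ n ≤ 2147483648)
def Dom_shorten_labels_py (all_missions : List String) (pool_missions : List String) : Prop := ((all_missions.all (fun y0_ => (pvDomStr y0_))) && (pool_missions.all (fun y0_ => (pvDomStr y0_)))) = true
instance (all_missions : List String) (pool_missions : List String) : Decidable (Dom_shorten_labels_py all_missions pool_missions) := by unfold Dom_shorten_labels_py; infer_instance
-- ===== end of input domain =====

-- B replaces A's candidate-shrinking while-loops for the common prefix/suffix by a single
-- column scan over zip(*strings) (suffix = prefix of the reversed strings, reversed);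
-- the final stripping loop is kept as-is.

-- ===== PORT A =====
-- inner while loop of _longest_common_prefix: 'while not s.startswith(prefix): prefix = prefix[:-1];
-- if not prefix: return ""' — 'none' is the early 'return ""' from the whole function
def pvShrinkP (p s : List Char) : Option (List Char) :=
  if PySem.Chars.startswith s p then some p
  else
    let p' := p.dropLast
    if p' = [] then none else pvShrinkP p' s
termination_by p.length
decreasing_by
  have hp : p ≠ [] := by
    rintro rfl
    simp [PySem.Chars.startswith_iff] at *
  have := List.length_pos_iff.mpr hp
  simp [List.length_dropLast]; omega

-- the 'for s in strings[1:]' loop of _longest_common_prefix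
def pvLcpGo : List Char → List (List Char) → List Char
  | pfx, [] => pfx
  | pfx, s :: rest =>
    match pvShrinkP pfx s with
    | none => []
    | some p' => pvLcpGo p' rest

def pvLcpA : List (List Char) → List Char
  | [] => []
  | p0 :: rest => pvLcpGo p0 rest

-- inner while loop of _longest_common_suffix ('suffix = suffix[1:]')
def pvShrinkS (p s : List Char) : Option (List Char) :=
  if PySem.Chars.endswith s p then some p
  else
    let p' := p.tail
    if p' = [] then none else pvShrinkS p' s
termination_by p.length
decreasing_by
  have hp : p ≠ [] := by
    rintro rfl
    simp [PySem.Chars.endswith_iff] at *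
  have := List.length_pos_iff.mpr hp
  simp [List.length_tail]; omega

def pvLcsGo : List Char → List (List Char) → List Char
  | sfx, [] => sfx
  | sfx, s :: rest =>
    match pvShrinkS sfx s with
    | none => []
    | some p' => pvLcsGo p' rest

def pvLcsA : List (List Char) → List Char
  | [] => []
  | p0 :: rest => pvLcsGo p0 rest

def shorten_labels_py (all_missions : List String) (pool_missions : List String) : List String :=
  let pfx := pvLcpA (all_missions.map String.toList)
  let sfx := pvLcsA (all_missions.map String.toList)
  pool_missions.map (fun m =>
    let s0 := m.toList
    let s1 := if pfx ≠ [] then PySem.Chars.slice s0 (some (pfx.length : Int)) none else s0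
    let s2 := if sfx ≠ [] ∧ PySem.Chars.endswith s1 sfx then
                PySem.Chars.slice s1 none (some (-(sfx.length : Int))) else s1
    String.ofList (if s2 ≠ [] then s2 else s0))

-- ===== PORT B =====
-- 'for chars in zip(*strings): if all(c == chars[0] for c in chars): out.append(chars[0]) else: break'
def pvColPrefix : List (List Char) → List Char
  | [] => []
  | [] :: _ => []
  | (c :: l0) :: rest =>
    if rest.all (fun s => s.head? == some c) then
      c :: pvColPrefix (l0 :: rest.map List.tail)
    else []
termination_by ls => (ls.headD []).length
decreasing_by simp

-- _common_prefix([s[::-1] for s in strings])[::-1]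
def pvColSuffix (ls : List (List Char)) : List Char :=
  (pvColPrefix (ls.map List.reverse)).reverse

def shorten_labels_py_alt (all_missions : List String) (pool_missions : List String) : List String :=
  let pfx := pvColPrefix (all_missions.map String.toList)
  let sfx := pvColSuffix (all_missions.map String.toList)
  pool_missions.map (fun m =>
    let s0 := m.toList
    let s1 := if pfx ≠ [] then PySem.Chars.slice s0 (some (pfx.length : Int)) none else s0
    let s2 := if sfx ≠ [] ∧ PySem.Chars.endswith s1 sfx then
                PySem.Chars.slice s1 none (some (-(sfx.length : Int))) else s1
    String.ofList (if s2 ≠ [] then s2 else s0))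

-- ===== PRECONDITION & SPEC =====
def Spec_shorten_labels_py (all_missions : List String) (pool_missions : List String) (out : List String) : Prop := out = shorten_labels_py_alt all_missions pool_missions
instance (all_missions : List String) (pool_missions : List String) (out : List String) : Decidable (Spec_shorten_labels_py all_missions pool_missions out) := by unfold Spec_shorten_labels_py; infer_instance

-- ===== CLAIM (what is proved, stated in full; the proofs are below) =====
def Claim_equal_shorten_labels_py : Prop := ∀ (all_missions : List String) (pool_missions : List String), Dom_shorten_labels_py all_missions pool_missions → Spec_shorten_labels_py all_missions pool_missions (shorten_labels_py all_missions pool_missions)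

-- ===== LEMMAS AND PROOFS =====

-- reference function: the longest common prefix of two strings
def pvLcp2 : List Char → List Char → List Char
  | a :: as, b :: bs => if a = b then a :: pvLcp2 as bs else []
  | _, _ => []

lemma pvLcp2_nil_left (s : List Char) : pvLcp2 [] s = [] := by cases s <;> rfl

lemma pvLcp2_nil_right (p : List Char) : pvLcp2 p [] = [] := by cases p <;> rfl

lemma pvFoldl_nil (xs : List (List Char)) : List.foldl pvLcp2 [] xs = [] := by
  induction xs with
  | nil => rfl
  | cons s rest ih => simp [pvLcp2_nil_left, ih]

lemma pvLcp2_of_prefix {p s : List Char} (h : p <+: s) : pvLcp2 p s = p := by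
  induction p generalizing s with
  | nil => exact pvLcp2_nil_left s
  | cons a as ih =>
    cases s with
    | nil => simp at h
    | cons b bs =>
      rw [List.cons_prefix_cons] at h
      simp [pvLcp2, h.1, ih h.2]

lemma pvLcp2_dropLast {p s : List Char} (h : ¬ p <+: s) :
    pvLcp2 p s = pvLcp2 p.dropLast s := by
  induction p generalizing s with
  | nil => exact absurd (List.nil_prefix) h
  | cons a as ih =>
    cases s with
    | nil => rw [pvLcp2_nil_right, pvLcp2_nil_right]
    | cons b bs =>
      by_cases hab : a = b
      · subst hab
        rw [List.cons_prefix_cons] at h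
        have has : as ≠ [] := by rintro rfl; exact h ⟨rfl, List.nil_prefix⟩
        have h2 : ¬ as <+: bs := fun hc => h ⟨rfl, hc⟩
        obtain ⟨a', as', rfl⟩ := List.exists_cons_of_ne_nil has
        simp only [pvLcp2, List.dropLast_cons₂]
        rw [ih h2]
      · cases as with
        | nil => simp [pvLcp2, hab, pvLcp2_nil_left]
        | cons y ys =>
          rw [List.dropLast_cons₂]
          simp [pvLcp2, hab]

lemma pvShrinkP_eq (p s : List Char) :
    pvShrinkP p s = if p = [] ∨ pvLcp2 p s ≠ [] then some (pvLcp2 p s) else none := by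
  induction hn : p.length using Nat.strong_induction_on generalizing p with
  | _ n ih =>
  subst hn
  rw [pvShrinkP]
  by_cases hsw : PySem.Chars.startswith s p
  · rw [if_pos hsw, pvLcp2_of_prefix ((PySem.Chars.startswith_iff s p).mp hsw)]
    by_cases hp : p = [] <;> simp [hp]
  · rw [if_neg hsw]
    have hpre : ¬ p <+: s := fun hc => hsw ((PySem.Chars.startswith_iff s p).mpr hc)
    have hp : p ≠ [] := by rintro rfl; exact hpre List.nil_prefix
    have hlt : p.dropLast.length < p.length := by
      have := List.length_pos_iff.mpr hp; simp [List.length_dropLast]; omega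
    rw [pvLcp2_dropLast hpre]
    by_cases hd : p.dropLast = []
    · simp [hd, pvLcp2_nil_left, hp]
    · simp only [if_neg hd]
      rw [ih _ hlt _ rfl]
      simp [hd, hp]

lemma pvLcpGo_eq (rest : List (List Char)) (pfx : List Char) :
    pvLcpGo pfx rest = List.foldl pvLcp2 pfx rest := by
  induction rest generalizing pfx with
  | nil => rfl
  | cons s rest ih =>
    rw [pvLcpGo, pvShrinkP_eq]
    by_cases h : pfx = [] ∨ pvLcp2 pfx s ≠ []
    · simp only [if_pos h, ih, List.foldl_cons]
    · rw [not_or] at h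
      have h2 : pvLcp2 pfx s = [] := not_not.mp h.2
      rw [if_neg (not_or.mpr ⟨h.1, by simp [h2]⟩), List.foldl_cons, h2, pvFoldl_nil]

lemma pvFoldl_cons_of_heads {c : Char} (xs : List (List Char)) (a : List Char)
    (h : ∀ s ∈ xs, s.head? = some c) :
    List.foldl pvLcp2 (c :: a) xs = c :: List.foldl pvLcp2 a (xs.map List.tail) := by
  induction xs generalizing a with
  | nil => rfl
  | cons s rest ih =>
    obtain ⟨s', rfl⟩ : ∃ s', s = c :: s' := by
      cases s with
      | nil => simp at h
      | cons d ds => exact ⟨ds, by have := h (d :: ds) (by simp); simp_all⟩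
    simp only [List.foldl_cons, List.map_cons, List.tail_cons]
    rw [show pvLcp2 (c :: a) (c :: s') = c :: pvLcp2 a s' by simp [pvLcp2]]
    exact ih _ (fun t ht => h t (by simp [ht]))

lemma pvFoldl_bad_head {c : Char} (xs : List (List Char)) (a : List Char)
    (ha : a.head? = some c) (h : ¬ ∀ s ∈ xs, s.head? = some c) :
    List.foldl pvLcp2 a xs = [] := by
  induction xs generalizing a with
  | nil => exact absurd (by simp) h
  | cons s rest ih =>
    obtain ⟨a', rfl⟩ : ∃ a', a = c :: a' := by
      cases a with
      | nil => simp at ha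
      | cons d ds => exact ⟨ds, by simp_all⟩
    cases s with
    | nil => simp [pvLcp2_nil_right, pvFoldl_nil]
    | cons d ds =>
      by_cases hdc : d = c
      · subst hdc
        simp only [List.foldl_cons]
        rw [show pvLcp2 (d :: a') (d :: ds) = d :: pvLcp2 a' ds by simp [pvLcp2]]
        exact ih _ rfl (by simp_all)
      · simp only [List.foldl_cons]
        rw [show pvLcp2 (c :: a') (d :: ds) = [] by
              simp [pvLcp2, show ¬ c = d from fun h => hdc h.symm]]
        exact pvFoldl_nil rest

lemma pvColPrefix_eq (x : List Char) (xs : List (List Char)) :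
    pvColPrefix (x :: xs) = List.foldl pvLcp2 x xs := by
  induction x generalizing xs with
  | nil => rw [pvColPrefix, pvFoldl_nil]
  | cons c l0 ih =>
    rw [pvColPrefix]
    by_cases h : ∀ s ∈ xs, s.head? = some c
    · rw [if_pos (by simpa using h), ih, pvFoldl_cons_of_heads xs l0 h]
    · rw [if_neg (by simpa using h), pvFoldl_bad_head xs (c :: l0) rfl h]

lemma pvShrinkS_eq (p s : List Char) :
    pvShrinkS p s = (pvShrinkP p.reverse s.reverse).map List.reverse := by
  induction hn : p.length using Nat.strong_induction_on generalizing p with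
  | _ n ih =>
  subst hn
  rw [pvShrinkS, pvShrinkP]
  by_cases hew : PySem.Chars.endswith s p
  · have hsw : PySem.Chars.startswith s.reverse p.reverse = true := by
      rw [PySem.Chars.startswith_iff, List.reverse_prefix]
      exact (PySem.Chars.endswith_iff s p).mp hew
    rw [if_pos hew, if_pos hsw]
    simp
  · have hsw : ¬ PySem.Chars.startswith s.reverse p.reverse = true := by
      rw [PySem.Chars.startswith_iff, List.reverse_prefix]
      exact fun hc => hew ((PySem.Chars.endswith_iff s p).mpr hc)
    have hp : p ≠ [] := by
      rintro rfl; exact hew ((PySem.Chars.endswith_iff s []).mpr (List.nil_suffix))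
    have hrev : p.reverse.dropLast = p.tail.reverse := by
      cases p with
      | nil => rfl
      | cons a l => rw [List.tail_cons, List.reverse_cons, List.dropLast_concat]
    rw [if_neg hew, if_neg hsw]
    simp only [hrev]
    by_cases ht : p.tail = []
    · rw [if_pos ht, if_pos (by simp [ht])]
      rfl
    · rw [if_neg ht, if_neg (by simp [ht])]
      have hlt : p.tail.length < p.length := by
        have := List.length_pos_iff.mpr hp; simp [List.length_tail]; omega
      rw [ih _ hlt _ rfl]

lemma pvLcsGo_eq (rest : List (List Char)) (sfx : List Char) :
    pvLcsGo sfx rest = (pvLcpGo sfx.reverse (rest.map List.reverse)).reverse := by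
  induction rest generalizing sfx with
  | nil => simp [pvLcsGo, pvLcpGo]
  | cons s rest ih =>
    rw [pvLcsGo, pvShrinkS_eq]
    simp only [List.map_cons]
    rw [pvLcpGo]
    cases h : pvShrinkP sfx.reverse s.reverse with
    | none => simp
    | some q => simpa using ih q.reverse

lemma pvLcpA_eq (ls : List (List Char)) : pvLcpA ls = pvColPrefix ls := by
  cases ls with
  | nil => rw [pvLcpA, pvColPrefix]
  | cons x rest => rw [pvLcpA, pvLcpGo_eq, pvColPrefix_eq]

lemma pvLcsA_eq (ls : List (List Char)) : pvLcsA ls = pvColSuffix ls := by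
  cases ls with
  | nil => rw [pvLcsA, pvColSuffix]; simp [pvColPrefix]
  | cons x rest =>
    rw [pvLcsA, pvLcsGo_eq, pvLcpGo_eq, pvColSuffix]
    simp only [List.map_cons]
    rw [pvColPrefix_eq]

-- ===== VERDICT (by name: the statement is the Claim_ definition above) =====
theorem shorten_labels_py_spec : Claim_equal_shorten_labels_py := by
  intro all_missions pool_missions _dom
  unfold Spec_shorten_labels_py shorten_labels_py shorten_labels_py_alt
  rw [pvLcpA_eq, pvLcsA_eq]
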